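/- GENERATED by farm/mkstatement.py from design/units.split.tsv — do not edit.
   THE SPLIT of the proof unit `start_decoder.F4` into `start_decoder.F4a`, `start_decoder.F4b`, `start_decoder.F4c`, `start_decoder.F4d`, `start_decoder.F4e`: the children's statements give the parent's
   UNCHANGED statement (so nothing above the parent — callers, compositions — is touched by the split). -/
import Vorbis.Spec.StartDecoderF4
import Vorbis.Spec.Units.start_decoder_F4
import Vorbis.Spec.Units.start_decoder_F4a
import Vorbis.Spec.Units.start_decoder_F4b
import Vorbis.Spec.Units.start_decoder_F4c
import Vorbis.Spec.Units.start_decoder_F4d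
import Vorbis.Spec.Units.start_decoder_F4e
namespace Vorbis.Spec.Splits
open X86 X86.User Asan

/-- The children of the split unit `start_decoder.F4` prove it, by `Vorbis.Spec.StartDecoder.SegF4.of_parts`. -/
theorem start_decoder_F4
    (h_start_decoder_F4a : Vorbis.Spec.start_decoder_F4a.Statement)
    (h_start_decoder_F4b : Vorbis.Spec.start_decoder_F4b.Statement)
    (h_start_decoder_F4c : Vorbis.Spec.start_decoder_F4c.Statement)
    (h_start_decoder_F4d : Vorbis.Spec.start_decoder_F4d.Statement)
    (h_start_decoder_F4e : Vorbis.Spec.start_decoder_F4e.Statement) :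
    Vorbis.Spec.start_decoder_F4.Statement := by
  intro Lay _hLay μ _hμ u₀ _hcode _h_get_bits _h_asan_store1_noabort _h_asan_store2_noabort _h_asan_load4_noabort _h_error
  apply Vorbis.Spec.StartDecoder.SegF4.of_parts
  · exact h_start_decoder_F4a Lay _hLay μ _hμ u₀ _hcode
  · exact h_start_decoder_F4b Lay _hLay μ _hμ u₀ _hcode _h_get_bits _h_asan_store1_noabort
  · exact h_start_decoder_F4c Lay _hLay μ _hμ u₀ _hcode _h_get_bits _h_asan_store1_noabort _h_asan_load4_noabort _h_error
  · exact h_start_decoder_F4d Lay _hLay μ _hμ u₀ _hcode _h_get_bits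
  · exact h_start_decoder_F4e Lay _hLay μ _hμ u₀ _hcode _h_asan_store2_noabort _h_asan_load4_noabort _h_error

end Vorbis.Spec.Splits
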